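-- pv_equiv track=rewrite | github.com/ian0830/ml2021-final | adaBoost/csvfiledata.py | merge_file
-- ===== SOURCE A (Python) =====
-- def merge_file(data1, data2, data1_header, data2_header):
--     header = []
--     headerDict = {}
--     header_counter = 0
--     # deal with headers
--     for item in data1_header:
--         header.append(item)
--         headerDict[item] = header_counter
--         header_counter = header_counter + 1
--     for item in data2_header:
--         if not(item in header):
--             header.append(item)
--             headerDict[item] = header_counter
--             header_counter = header_counter + 1
--     # data
--     result = []
--     resultDict = {}
--     result_counter = 0
--     for i in range(len(data1)):
--         resultDict[data1[i][0]] = result_counter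
--         result_counter = result_counter + 1
--         result.append(['' for i in range(len(header))])
--         for j in range(len(data1[i])):
--             result[resultDict[data1[i][0]]][headerDict[data1_header[j]]] = data1[i][j]
--     for i in range(len(data2)):
--         if resultDict.get(data2[i][0]) == None:
--             resultDict[data2[i][0]] = result_counter
--             result_counter = result_counter + 1
--             result.append(['' for i in range(len(header))])
--         for j in range(len(data2[i])):
--             result[resultDict[data2[i][0]]][headerDict[data2_header[j]]] = data2[i][j]
--     return  header,result
-- ===== SOURCE B (Python) =====
-- def merge_file(data1, data2, data1_header, data2_header):
--     header = list(data1_header)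
--     for h in data2_header:
--         if h not in header:
--             header.append(h)
--     rows = []           # each row is a dict keyed by header name
--     index = {}          # first-column key -> position in rows
--     for r in data1:
--         index[r[0]] = len(rows)
--         rows.append(dict(zip(data1_header, r)))
--     for r in data2:
--         i = index.get(r[0])
--         if i is None:
--             index[r[0]] = len(rows)
--             rows.append(dict(zip(data2_header, r)))
--         else:
--             rows[i].update(zip(data2_header, r))
--     pos = {h: i for i, h in enumerate(header)}
--     result = []
--     for d in rows:
--         row = [''] * len(header)
--         for k, v in d.items():
--             row[pos[k]] = v
--         result.append(row)
--     return header, result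
-- ===== Notes on version B (the rewrite author's own statement) =====
-- stated objective: simpler
-- what changed: B represents each output row as a dict keyed by header name (dict(zip(...)) / dict.update) and materializes all rows once at the end through a name-to-position map, instead of A's preallocated ''-padded list rows written in place through headerDict during the scan.
import Mathlib
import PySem

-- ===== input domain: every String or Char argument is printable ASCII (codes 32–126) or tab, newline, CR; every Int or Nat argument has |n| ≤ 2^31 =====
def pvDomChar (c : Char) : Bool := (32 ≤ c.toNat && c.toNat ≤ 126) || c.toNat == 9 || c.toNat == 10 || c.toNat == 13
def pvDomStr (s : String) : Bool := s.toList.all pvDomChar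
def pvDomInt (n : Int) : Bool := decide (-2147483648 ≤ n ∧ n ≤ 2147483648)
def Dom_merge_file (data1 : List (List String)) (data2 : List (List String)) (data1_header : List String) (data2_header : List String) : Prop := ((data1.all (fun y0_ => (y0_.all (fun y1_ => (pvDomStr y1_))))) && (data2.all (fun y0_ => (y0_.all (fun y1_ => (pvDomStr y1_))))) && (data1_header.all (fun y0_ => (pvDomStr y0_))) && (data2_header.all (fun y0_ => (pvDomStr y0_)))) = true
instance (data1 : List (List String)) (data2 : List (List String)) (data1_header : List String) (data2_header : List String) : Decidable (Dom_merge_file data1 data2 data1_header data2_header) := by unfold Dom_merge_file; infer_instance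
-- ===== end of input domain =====

-- B represents each merged row as a dict keyed by header name and materializes all rows once at
-- the end through a name→position map, instead of A's preallocated ''-rows written in place
-- through headerDict during the scan (objective: simpler).

-- ===== PORT A =====
-- Each pv…Step helper is the body of the corresponding Python loop, verbatim.
-- Counters are nonnegative Python ints, kept as Nat.
-- Pre_ guarantees every indexing A performs is in range and every dict lookup hits
-- (Python raises otherwise), so the `getD`/`headD` defaults below are never consulted on Pre_.

-- header loop bodies; state (header, headerDict, header_counter)
def pvHStep1 (st : List String × PySem.Dict String Nat × Nat) (item : String) :
    List String × PySem.Dict String Nat × Nat :=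
  (st.1 ++ [item], st.2.1.insert item st.2.2, st.2.2 + 1)

def pvHStep2 (st : List String × PySem.Dict String Nat × Nat) (item : String) :
    List String × PySem.Dict String Nat × Nat :=
  if item ∈ st.1 then st
  else (st.1 ++ [item], st.2.1.insert item st.2.2, st.2.2 + 1)

-- inner loop `for j in range(len(r)): result[resultDict[key]][headerDict[hh[j]]] = r[j]`
def pvWrites (hd rd : PySem.Dict String Nat) (hh : List String) (key : String)
    (r : List String) (res : List (List String)) : List (List String) :=
  (List.range r.length).foldl
    (fun res j =>
      let idx := (rd.get? key).getD 0                      -- resultDict[key]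
      let col := (hd.get? (hh.getD j "")).getD 0           -- headerDict[hh[j]]
      res.set idx ((res.getD idx []).set col (r.getD j ""))) res

-- data1 loop body; state (result, resultDict, result_counter)
def pvDStep1 (hd : PySem.Dict String Nat) (header hh : List String)
    (st : List (List String) × PySem.Dict String Nat × Nat) (r : List String) :
    List (List String) × PySem.Dict String Nat × Nat :=
  let key := r.headD ""                                    -- data1[i][0]; r ≠ [] on Pre_
  let rd := st.2.1.insert key st.2.2
  let res := st.1 ++ [List.replicate header.length ""]     -- ['' for i in range(len(header))]
  (pvWrites hd rd hh key r res, rd, st.2.2 + 1)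

-- data2 loop body
def pvDStep2 (hd : PySem.Dict String Nat) (header hh : List String)
    (st : List (List String) × PySem.Dict String Nat × Nat) (r : List String) :
    List (List String) × PySem.Dict String Nat × Nat :=
  let key := r.headD ""
  let st' := match st.2.1.get? key with                    -- resultDict.get(...) == None
    | none => (st.1 ++ [List.replicate header.length ""], st.2.1.insert key st.2.2, st.2.2 + 1)
    | some _ => st
  (pvWrites hd st'.2.1 hh key r st'.1, st'.2.1, st'.2.2)

def merge_file (data1 : List (List String)) (data2 : List (List String)) (data1_header : List String) (data2_header : List String) : List String × List (List String) :=
  let st1 := data1_header.foldl pvHStep1 ([], PySem.Dict.empty, 0)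
  let st2 := data2_header.foldl pvHStep2 st1
  let header := st2.1
  let hd := st2.2.1
  let stA := data1.foldl (pvDStep1 hd header data1_header) ([], PySem.Dict.empty, 0)
  let stB := data2.foldl (pvDStep2 hd header data2_header) stA
  (header, stB.1)

-- ===== PORT B =====
-- dict(zip(hh, r)) / rows[i].update(zip(hh, r))
def pvRowUpd (hh : List String) (r : List String) (d : PySem.Dict String String) :
    PySem.Dict String String :=
  (hh.zip r).foldl (fun d kv => d.insert kv.1 kv.2) d

-- pos = {h: i for i, h in enumerate(header)}
def pvPos (header : List String) : PySem.Dict String Int :=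
  (PySem.List.enumerate header).foldl (fun d p => d.insert p.2 p.1) PySem.Dict.empty

-- data1 loop body; state (rows, index)
def pvBStep1 (hh : List String)
    (st : List (PySem.Dict String String) × PySem.Dict String Nat) (r : List String) :
    List (PySem.Dict String String) × PySem.Dict String Nat :=
  (st.1 ++ [pvRowUpd hh r PySem.Dict.empty], st.2.insert (r.headD "") st.1.length)

-- data2 loop body
def pvBStep2 (hh : List String)
    (st : List (PySem.Dict String String) × PySem.Dict String Nat) (r : List String) :
    List (PySem.Dict String String) × PySem.Dict String Nat :=
  match st.2.get? (r.headD "") with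
  | none => (st.1 ++ [pvRowUpd hh r PySem.Dict.empty], st.2.insert (r.headD "") st.1.length)
  | some i => (st.1.set i (pvRowUpd hh r (st.1.getD i PySem.Dict.empty)), st.2)

-- `row = ['']*len(header); for k, v in d.items(): row[pos[k]] = v`
-- (pos[k] is a nonnegative enumerate index and k is always a key of pos, so `.getD 0 |>.toNat`
-- is exact here)
def pvMat (pos : PySem.Dict String Int) (n : Nat) (d : PySem.Dict String String) : List String :=
  d.items.foldl (fun row kv => row.set ((pos.get? kv.1).getD 0).toNat kv.2) (List.replicate n "")

def merge_file_alt (data1 : List (List String)) (data2 : List (List String)) (data1_header : List String) (data2_header : List String) : List String × List (List String) :=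
  let header := data2_header.foldl (fun acc h => if h ∈ acc then acc else acc ++ [h]) data1_header
  let st1 := data1.foldl (pvBStep1 data1_header) ([], PySem.Dict.empty)
  let st2 := data2.foldl (pvBStep2 data2_header) st1
  let pos := pvPos header
  (header, st2.1.map (pvMat pos header.length))

-- ===== PRECONDITION & SPEC =====
-- Pre_ excludes exactly the inputs on which Python A raises IndexError: a row that is empty
-- (r[0]) or longer than its own header (hh[j] out of range).
def Pre_merge_file (data1 : List (List String)) (data2 : List (List String)) (data1_header : List String) (data2_header : List String) : Prop :=
  (∀ r ∈ data1, r ≠ [] ∧ r.length ≤ data1_header.length) ∧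
  (∀ r ∈ data2, r ≠ [] ∧ r.length ≤ data2_header.length)
instance (data1 : List (List String)) (data2 : List (List String)) (data1_header : List String) (data2_header : List String) : Decidable (Pre_merge_file data1 data2 data1_header data2_header) := by unfold Pre_merge_file; infer_instance

def pvWitness_merge_file : List (List String) × List (List String) × List String × List String :=
  ([["1", "x"], ["2", "y"]], [["2", "z"], ["3", "w"]], ["id", "a"], ["id", "b"])

def Spec_merge_file (data1 : List (List String)) (data2 : List (List String)) (data1_header : List String) (data2_header : List String) (out : List String × List (List String)) : Prop := out = merge_file_alt data1 data2 data1_header data2_header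
instance (data1 : List (List String)) (data2 : List (List String)) (data1_header : List String) (data2_header : List String) (out : List String × List (List String)) : Decidable (Spec_merge_file data1 data2 data1_header data2_header out) := by unfold Spec_merge_file; infer_instance

-- ===== CLAIM (what is proved, stated in full; the proofs are below) =====
def Claim_equal_merge_file : Prop := ∀ (data1 : List (List String)) (data2 : List (List String)) (data1_header : List String) (data2_header : List String), Dom_merge_file data1 data2 data1_header data2_header → Pre_merge_file data1 data2 data1_header data2_header → Spec_merge_file data1 data2 data1_header data2_header (merge_file data1 data2 data1_header data2_header)

-- ===== LEMMAS AND PROOFS =====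

-- Nat-valued name→position map (the value headerDict reaches: LAST occurrence wins)
def pvPosN (l : List String) : PySem.Dict String Nat :=
  (List.range l.length).foldl (fun d i => d.insert (l.getD i "") i) PySem.Dict.empty

theorem pvPosN_snoc (l : List String) (x : String) :
    pvPosN (l ++ [x]) = (pvPosN l).insert x l.length := by
  unfold pvPosN
  rw [List.length_append, List.length_singleton, List.range_succ, List.foldl_append]
  simp only [List.foldl_cons, List.foldl_nil]
  have hx : (l ++ [x]).getD l.length "" = x := by
    rw [List.getD_eq_getElem _ _ (by simp)]
    simp
  rw [hx]
  congr 1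
  have hcong : ∀ (rng : List Nat), (∀ i ∈ rng, i < l.length) →
      ∀ d : PySem.Dict String Nat,
      rng.foldl (fun d i => d.insert ((l ++ [x]).getD i "") i) d
        = rng.foldl (fun d i => d.insert (l.getD i "") i) d := by
    intro rng
    induction rng with
    | nil => intro _ d; rfl
    | cons j t ih =>
      intro hmem d
      simp only [List.foldl_cons]
      rw [List.getD_append _ _ _ _ (hmem j (by simp))]
      exact ih (fun i hi => hmem i (by simp [hi])) _
  exact hcong _ (fun i hi => List.mem_range.mp hi) _

theorem pvPos_snoc (l : List String) (x : String) :
    pvPos (l ++ [x]) = (pvPos l).insert x (l.length : Int) := by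
  unfold pvPos
  rw [PySem.List.enumerate_append, List.foldl_append]
  simp [PySem.List.enumerate_cons, PySem.List.enumerate_nil]

theorem pvPos_get (l : List String) (k : String) :
    (pvPos l).get? k = ((pvPosN l).get? k).map (fun n => (n : Int)) := by
  induction l using List.reverseRecOn with
  | nil => simp [pvPos, pvPosN, PySem.List.enumerate_nil, PySem.Dict.get?_empty]
  | append_singleton l x ih =>
    rw [pvPos_snoc, pvPosN_snoc, PySem.Dict.get?_insert, PySem.Dict.get?_insert]
    by_cases hk : k = x <;> simp [hk, ih]

theorem pvPosN_lt (l : List String) (k : String) (i : Nat)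
    (h : (pvPosN l).get? k = some i) : i < l.length := by
  induction l using List.reverseRecOn generalizing i with
  | nil => simp [pvPosN, PySem.Dict.get?_empty] at h
  | append_singleton l x ih =>
    rw [pvPosN_snoc, PySem.Dict.get?_insert] at h
    by_cases hk : k = x
    · rw [if_pos hk] at h; cases h; simp
    · rw [if_neg hk] at h; have := ih _ h; simp; omega

theorem pvPosN_mem (l : List String) (k : String) (h : k ∈ l) :
    ∃ i, (pvPosN l).get? k = some i := by
  induction l using List.reverseRecOn with
  | nil => cases h
  | append_singleton l x ih =>
    rw [pvPosN_snoc, PySem.Dict.get?_insert]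
    by_cases hk : k = x
    · exact ⟨l.length, by rw [if_pos hk]⟩
    · have hkl : k ∈ l := by
        rcases List.mem_append.mp h with h1 | h1
        · exact h1
        · simp at h1; exact absurd h1 hk
      rcases ih hkl with ⟨i, hi⟩
      exact ⟨i, by rw [if_neg hk, hi]⟩

theorem pvPosN_inj (l : List String) (k1 k2 : String) (i : Nat)
    (h1 : (pvPosN l).get? k1 = some i) (h2 : (pvPosN l).get? k2 = some i) : k1 = k2 := by
  induction l using List.reverseRecOn generalizing i with
  | nil => simp [pvPosN, PySem.Dict.get?_empty] at h1
  | append_singleton l x ih =>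
    rw [pvPosN_snoc, PySem.Dict.get?_insert] at h1 h2
    by_cases hk1 : k1 = x <;> by_cases hk2 : k2 = x
    · rw [hk1, hk2]
    · rw [if_pos hk1] at h1; rw [if_neg hk2] at h2
      cases h1; exact absurd (pvPosN_lt l k2 _ h2) (lt_irrefl _)
    · rw [if_neg hk1] at h1; rw [if_pos hk2] at h2
      cases h2; exact absurd (pvPosN_lt l k1 _ h1) (lt_irrefl _)
    · rw [if_neg hk1] at h1; rw [if_neg hk2] at h2; exact ih _ h1 h2

-- materialization over the Nat position map
def matRow (pos : PySem.Dict String Nat) (n : Nat) (d : PySem.Dict String String) : List String :=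
  d.items.foldl (fun row kv => row.set ((pos.get? kv.1).getD 0) kv.2) (List.replicate n "")

-- B's pvMat computes matRow over pvPosN
theorem pvMat_eq_matRow (l : List String) (d : PySem.Dict String String) :
    pvMat (pvPos l) l.length d = matRow (pvPosN l) l.length d := by
  unfold pvMat matRow
  congr 1
  funext row kv
  rw [pvPos_get]
  cases h : (pvPosN l).get? kv.1 <;> simp [h]

theorem matRow_empty (pos : PySem.Dict String Nat) (n : Nat) :
    matRow pos n PySem.Dict.empty = List.replicate n "" := rfl

theorem fold_set_comm (pos : PySem.Dict String Nat) (items : List (String × String)) (p : Nat)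
    (hne : ∀ q ∈ items, ((pos.get? q.1).getD 0) ≠ p) :
    ∀ (row : List String) (v : String),
    items.foldl (fun row kv => row.set ((pos.get? kv.1).getD 0) kv.2) (row.set p v)
      = (items.foldl (fun row kv => row.set ((pos.get? kv.1).getD 0) kv.2) row).set p v := by
  induction items with
  | nil => intro row v; rfl
  | cons q t ih =>
    intro row v
    simp only [List.foldl_cons]
    rw [List.set_comm _ _ (Ne.symm (hne q (by simp)))]
    exact ih (fun q' hq' => hne q' (by simp [hq'])) _ v


-- replacing the unique occurrence of key k in the items list changes exactly column p
theorem fold_replace (pos : PySem.Dict String Nat) (k : String) (v : String) (p : Nat)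
    (hp : pos.get? k = some p)
    (inj : ∀ k1 k2 i, pos.get? k1 = some i → pos.get? k2 = some i → k1 = k2) :
    ∀ (items : List (String × String)), (items.map Prod.fst).Nodup → k ∈ items.map Prod.fst →
    (∀ q ∈ items, ∃ i, pos.get? q.1 = some i) →
    ∀ (row : List String), (items.map (fun q => if q.1 == k then (k, v) else q)).foldl
        (fun row kv => row.set ((pos.get? kv.1).getD 0) kv.2) row
      = (items.foldl (fun row kv => row.set ((pos.get? kv.1).getD 0) kv.2) row).set p v := by
  intro items
  induction items with
  | nil => intro _ hk; cases hk
  | cons q t ih =>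
    intro hnd hk hdom row
    have hnd' : q.1 ∉ t.map Prod.fst ∧ (t.map Prod.fst).Nodup := by
      simpa only [List.map_cons, List.nodup_cons] using hnd
    obtain ⟨hq, hndt⟩ := hnd'
    by_cases hqk : q.1 = k
    · -- q is the unique occurrence of k
      have hknt : k ∉ t.map Prod.fst := hqk ▸ hq
      have hmapid : t.map (fun q' => if q'.1 == k then (k, v) else q') = t := by
        have : t.map (fun q' => if q'.1 == k then (k, v) else q') = t.map id :=
          List.map_congr_left (fun q' hq' => by
            have hfalse : (q'.1 == k) = false :=
              beq_eq_false_iff_ne.mpr (fun he => hknt (he ▸ List.mem_map_of_mem hq'))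
            simp [hfalse])
        rw [this, List.map_id]
      have hner : ∀ q' ∈ t, ((pos.get? q'.1).getD 0) ≠ p := by
        intro q' hq'
        obtain ⟨i, hi⟩ := hdom q' (by simp [hq'])
        rw [hi]
        simp only [Option.getD_some]
        intro hip
        subst hip
        exact hknt (by
          rw [← inj q'.1 k i hi hp]
          exact List.mem_map_of_mem hq')
      simp only [List.map_cons, List.foldl_cons, hmapid, if_pos (beq_iff_eq.mpr hqk), hp,
        Option.getD_some]
      have hq1 : pos.get? q.1 = some p := hqk ▸ hp
      rw [hq1]
      simp only [Option.getD_some]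
      rw [fold_set_comm pos t p hner, fold_set_comm pos t p hner, List.set_set]
    · have hf : (q.1 == k) = false := beq_eq_false_iff_ne.mpr hqk
      simp only [List.map_cons, List.foldl_cons, hf, Bool.false_eq_true, if_false]
      exact ih hndt
        (by rcases (by simpa using hk : k = q.1 ∨ k ∈ t.map Prod.fst) with h | h
            · exact absurd h.symm hqk
            · exact h)
        (fun q' hq' => hdom q' (by simp [hq'])) _

theorem matRow_set (pos : PySem.Dict String Nat) (n : Nat) (d : PySem.Dict String String)
    (k : String) (v : String) (p : Nat) (hp : pos.get? k = some p)
    (inj : ∀ k1 k2 i, pos.get? k1 = some i → pos.get? k2 = some i → k1 = k2)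
    (hnd : d.keys.Nodup) (hdom : ∀ x ∈ d.keys, ∃ i, pos.get? x = some i) :
    (matRow pos n d).set p v = matRow pos n (d.insert k v) := by
  unfold matRow
  by_cases hc : d.contains k
  · rw [PySem.Dict.items_insert_of_contains _ _ hc]
    exact (fold_replace pos k v p hp inj d.items
      (by simpa only [PySem.Dict.keys] using hnd)
      (by have := (PySem.Dict.contains_iff_mem_keys d k).mp hc
          simpa only [PySem.Dict.keys] using this)
      (fun q hq => hdom q.1 (PySem.Dict.mem_keys_of_mem_items d hq)) _).symm
  · rw [PySem.Dict.items_insert_of_not_contains _ _ (by simpa using hc), List.foldl_append]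
    simp only [List.foldl_cons, List.foldl_nil, hp, Option.getD_some]

-- writing zip pairs into a materialized row = materializing the updated dict
theorem rowfold (pos : PySem.Dict String Nat) (n : Nat)
    (inj : ∀ k1 k2 i, pos.get? k1 = some i → pos.get? k2 = some i → k1 = k2) :
    ∀ (pairs : List (String × String)) (d : PySem.Dict String String),
    (∀ q ∈ pairs, ∃ i, pos.get? q.1 = some i) →
    d.keys.Nodup → (∀ x ∈ d.keys, ∃ i, pos.get? x = some i) →
    pairs.foldl (fun row kv => row.set ((pos.get? kv.1).getD 0) kv.2) (matRow pos n d)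
      = matRow pos n (pairs.foldl (fun d kv => d.insert kv.1 kv.2) d) := by
  intro pairs
  induction pairs with
  | nil => intro d _ _ _; rfl
  | cons q t ih =>
    intro d hq hnd hdom
    obtain ⟨p, hp⟩ := hq q (by simp)
    simp only [List.foldl_cons, hp, Option.getD_some]
    rw [matRow_set pos n d q.1 q.2 p hp inj hnd hdom]
    exact ih _ (fun q' hq' => hq q' (by simp [hq']))
      (PySem.Dict.nodup_keys_insert _ _ _ hnd)
      (fun x hx => by
        rcases (PySem.Dict.mem_keys_insert _ _ _ _).mp hx with rfl | hx
        · exact ⟨p, hp⟩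
        · exact hdom x hx)

-- a fold over range(len r) with indexed access is the fold over zip
theorem range_foldl_zip {α : Type} (g : α → String → String → α) :
    ∀ (r hh : List String) (st : α), r.length ≤ hh.length →
    (List.range r.length).foldl (fun s j => g s (hh.getD j "") (r.getD j "")) st
      = (hh.zip r).foldl (fun s kv => g s kv.1 kv.2) st := by
  intro r
  induction r with
  | nil => intro hh st _; simp
  | cons a t ih =>
    intro hh st hle
    cases hh with
    | nil => simp at hle
    | cons b hh' =>
      simp only [List.length_cons, List.range_succ_eq_map, List.foldl_cons, List.foldl_map,
        List.getD_cons_zero, List.getD_cons_succ, List.zip_cons_cons]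
      exact ih hh' (g st b a) (by simpa using hle)

-- repeated writes to the same outer index collapse to one set
theorem fold_set_at (pairs : List (String × String)) (colOf : String → Nat) :
    ∀ (res : List (List String)) (i : Nat), i < res.length →
    pairs.foldl (fun res kv => res.set i ((res.getD i []).set (colOf kv.1) kv.2)) res
      = res.set i (pairs.foldl (fun row kv => row.set (colOf kv.1) kv.2) (res.getD i [])) := by
  induction pairs with
  | nil =>
    intro res i hi
    simp only [List.foldl_nil]
    rw [List.getD_eq_getElem _ _ hi, List.set_getElem_self]
  | cons p ps ih =>
    intro res i hi
    simp only [List.foldl_cons]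
    rw [ih _ i (by simpa using hi), List.set_set]
    congr 1
    rw [List.getD_eq_getElem _ _ (by simpa using hi), List.getElem_set_self]

-- pvWrites on a materialized result = one set of a materialized row-dict update
theorem pvWrites_eq (pos : PySem.Dict String Nat) (n : Nat)
    (inj : ∀ k1 k2 i, pos.get? k1 = some i → pos.get? k2 = some i → k1 = k2)
    (hh : List String) (hmemhh : ∀ x ∈ hh, ∃ i, pos.get? x = some i)
    (rd : PySem.Dict String Nat) (key : String) (r : List String)
    (hr : r.length ≤ hh.length)
    (res : List (List String)) (i : Nat) (hi : i < res.length)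
    (hidx : (rd.get? key).getD 0 = i)
    (d : PySem.Dict String String) (hnd : d.keys.Nodup)
    (hdom : ∀ x ∈ d.keys, ∃ j, pos.get? x = some j)
    (hres : res.getD i [] = matRow pos n d) :
    pvWrites pos rd hh key r res = res.set i (matRow pos n (pvRowUpd hh r d)) := by
  unfold pvWrites
  simp only [hidx]
  have e1 := range_foldl_zip
    (fun (s : List (List String)) k v => s.set i ((s.getD i []).set ((pos.get? k).getD 0) v))
    r hh res hr
  simp only at e1
  rw [e1]
  have e2 := fold_set_at (hh.zip r) (fun k => (pos.get? k).getD 0) res i hi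
  simp only at e2
  rw [e2, hres]
  have e3 := rowfold pos n inj (hh.zip r) d
    (fun q hq => hmemhh q.1 (List.of_mem_zip hq).1) hnd hdom
  simp only at e3
  rw [e3]
  rfl

-- invariant of A's header loops: headerDict is the last-occurrence position map, the counter
-- is the length
def HInv (st : List String × PySem.Dict String Nat × Nat) : Prop :=
  st.2.1 = pvPosN st.1 ∧ st.2.2 = st.1.length

theorem hstep (st : List String × PySem.Dict String Nat × Nat) (item : String) (hI : HInv st) :
    HInv (st.1 ++ [item], st.2.1.insert item st.2.2, st.2.2 + 1) :=
  ⟨by rw [hI.1, hI.2, pvPosN_snoc], by simp [hI.2]⟩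

theorem loop1 (l : List String) : ∀ (st : List String × PySem.Dict String Nat × Nat),
    HInv st →
    HInv (l.foldl pvHStep1 st) ∧ (l.foldl pvHStep1 st).1 = st.1 ++ l := by
  induction l with
  | nil => intro st hI; exact ⟨hI, by simp⟩
  | cons a t ih =>
    intro st hI
    simp only [List.foldl_cons, pvHStep1]
    obtain ⟨hI', he⟩ := ih _ (hstep st a hI)
    exact ⟨hI', by simp [he]⟩

theorem loop2 (l : List String) : ∀ (st : List String × PySem.Dict String Nat × Nat),
    HInv st →
    HInv (l.foldl pvHStep2 st) ∧
    (l.foldl pvHStep2 st).1 = l.foldl (fun acc h => if h ∈ acc then acc else acc ++ [h]) st.1 ∧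
    (∀ x ∈ st.1, x ∈ (l.foldl pvHStep2 st).1) ∧
    (∀ x ∈ l, x ∈ (l.foldl pvHStep2 st).1) := by
  induction l with
  | nil => intro st hI; exact ⟨hI, rfl, fun x hx => hx, by simp⟩
  | cons a t ih =>
    intro st hI
    simp only [List.foldl_cons, pvHStep2]
    by_cases ha : a ∈ st.1
    · rw [if_pos ha, if_pos ha]
      obtain ⟨hI', he, hsub, hall⟩ := ih st hI
      exact ⟨hI', he, hsub, by
        intro x hx
        rcases List.mem_cons.mp hx with rfl | hx
        · exact hsub x ha
        · exact hall x hx⟩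
    · rw [if_neg ha, if_neg ha]
      obtain ⟨hI', he, hsub, hall⟩ := ih _ (hstep st a hI)
      refine ⟨hI', he, ?_, ?_⟩
      · intro x hx; exact hsub x (by simp [hx])
      · intro x hx
        rcases List.mem_cons.mp hx with rfl | hx
        · exact hsub x (by simp)
        · exact hall x hx

-- keys of a zip-built row dict
theorem fold_ins_keys : ∀ (pairs : List (String × String)) (d : PySem.Dict String String)
    (x : String), x ∈ (pairs.foldl (fun d kv => d.insert kv.1 kv.2) d).keys →
    x ∈ d.keys ∨ x ∈ pairs.map Prod.fst := by
  intro pairs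
  induction pairs with
  | nil => intro d x hx; exact Or.inl hx
  | cons q t ih =>
    intro d x hx
    rcases ih _ x hx with hx | hx
    · rcases (PySem.Dict.mem_keys_insert _ _ _ _).mp hx with rfl | hx
      · exact Or.inr (by simp)
      · exact Or.inl hx
    · exact Or.inr (by simp [hx])

theorem fold_ins_nodup : ∀ (pairs : List (String × String)) (d : PySem.Dict String String),
    d.keys.Nodup → (pairs.foldl (fun d kv => d.insert kv.1 kv.2) d).keys.Nodup := by
  intro pairs
  induction pairs with
  | nil => intro d h; exact h
  | cons q t ih => intro d h; exact ih _ (PySem.Dict.nodup_keys_insert _ _ _ h)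

theorem pvRowUpd_keys (hh r : List String) (d : PySem.Dict String String) (x : String)
    (hx : x ∈ (pvRowUpd hh r d).keys) : x ∈ d.keys ∨ x ∈ hh := by
  rcases fold_ins_keys _ _ _ hx with h | h
  · exact Or.inl h
  · rcases List.mem_map.mp h with ⟨q, hq, rfl⟩
    exact Or.inr (List.of_mem_zip hq).1

theorem pvRowUpd_nodup (hh r : List String) (d : PySem.Dict String String)
    (h : d.keys.Nodup) : (pvRowUpd hh r d).keys.Nodup := fold_ins_nodup _ _ h

-- the data-phase invariant relating A's state to B's state
def DInv (pos : PySem.Dict String Nat) (n : Nat)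
    (a : List (List String) × PySem.Dict String Nat × Nat)
    (b : List (PySem.Dict String String) × PySem.Dict String Nat) : Prop :=
  a.1 = b.1.map (matRow pos n) ∧ a.2.1 = b.2 ∧ a.2.2 = b.1.length ∧
  (∀ k i, b.2.get? k = some i → i < b.1.length) ∧
  (∀ d ∈ b.1, d.keys.Nodup ∧ ∀ x ∈ d.keys, ∃ i, pos.get? x = some i)

theorem dstep1 (header hh : List String) (pos : PySem.Dict String Nat)
    (inj : ∀ k1 k2 i, pos.get? k1 = some i → pos.get? k2 = some i → k1 = k2)
    (hmemhh : ∀ x ∈ hh, ∃ i, pos.get? x = some i)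
    (a : List (List String) × PySem.Dict String Nat × Nat)
    (b : List (PySem.Dict String String) × PySem.Dict String Nat)
    (hI : DInv pos header.length a b) (r : List String) (hr : r.length ≤ hh.length) :
    DInv pos header.length (pvDStep1 pos header hh a r) (pvBStep1 hh b r) := by
  obtain ⟨h1, h2, h3, h4, h5⟩ := hI
  simp only [pvDStep1, pvBStep1]
  refine ⟨?_, by rw [h2, h3], by simp [h3], ?_, ?_⟩
  · rw [pvWrites_eq pos header.length inj hh hmemhh _ _ r hr
      (a.1 ++ [List.replicate header.length ""]) b.1.length
      (by simp [h1]) (by rw [PySem.Dict.get?_insert_self]; simpa using h3)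
      PySem.Dict.empty (by simp [PySem.Dict.keys_empty]) (by simp [PySem.Dict.keys_empty])
      (by rw [h1, List.getD_eq_getElem _ _ (by simp)]
          rw [List.getElem_append_right (by simp)]
          simp [matRow_empty])]
    rw [h1]
    rw [List.set_append_right _ _ (by simp)]
    simp [List.map_append]
  · intro k i
    rw [PySem.Dict.get?_insert]
    by_cases hk : k = r.headD ""
    · rw [if_pos hk]; intro h; cases h; simp
    · rw [if_neg hk]; intro h
      have := h4 k i h
      simp; omega
  · intro d hd
    rcases List.mem_append.mp hd with hd | hd
    · exact h5 d hd
    · simp only [List.mem_singleton] at hd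
      subst hd
      refine ⟨pvRowUpd_nodup _ _ _ (by simp [PySem.Dict.keys_empty]), ?_⟩
      intro x hx
      rcases pvRowUpd_keys _ _ _ _ hx with hx | hx
      · simp [PySem.Dict.keys_empty] at hx
      · exact hmemhh x hx

theorem dstep2 (header hh : List String) (pos : PySem.Dict String Nat)
    (inj : ∀ k1 k2 i, pos.get? k1 = some i → pos.get? k2 = some i → k1 = k2)
    (hmemhh : ∀ x ∈ hh, ∃ i, pos.get? x = some i)
    (a : List (List String) × PySem.Dict String Nat × Nat)
    (b : List (PySem.Dict String String) × PySem.Dict String Nat)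
    (hI : DInv pos header.length a b) (r : List String) (hr : r.length ≤ hh.length) :
    DInv pos header.length (pvDStep2 pos header hh a r) (pvBStep2 hh b r) := by
  obtain ⟨h1, h2, h3, h4, h5⟩ := hI
  simp only [pvDStep2, pvBStep2, h2]
  cases hg : b.2.get? (r.headD "") with
  | none =>
    refine ⟨?_, by rw [h3], by simp [h3], ?_, ?_⟩
    · rw [pvWrites_eq pos header.length inj hh hmemhh _ _ r hr
        (a.1 ++ [List.replicate header.length ""]) b.1.length
        (by simp [h1]) (by rw [PySem.Dict.get?_insert_self]; simpa using h3)
        PySem.Dict.empty (by simp [PySem.Dict.keys_empty]) (by simp [PySem.Dict.keys_empty])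
        (by rw [h1, List.getD_eq_getElem _ _ (by simp)]
            rw [List.getElem_append_right (by simp)]
            simp [matRow_empty])]
      rw [h1]
      rw [List.set_append_right _ _ (by simp)]
      simp [List.map_append]
    · intro k i
      rw [PySem.Dict.get?_insert]
      by_cases hk : k = r.headD ""
      · rw [if_pos hk]; intro h; cases h; simp
      · rw [if_neg hk]; intro h
        have := h4 k i h
        simp; omega
    · intro d hd
      rcases List.mem_append.mp hd with hd | hd
      · exact h5 d hd
      · simp only [List.mem_singleton] at hd
        subst hd
        refine ⟨pvRowUpd_nodup _ _ _ (by simp [PySem.Dict.keys_empty]), ?_⟩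
        intro x hx
        rcases pvRowUpd_keys _ _ _ _ hx with hx | hx
        · simp [PySem.Dict.keys_empty] at hx
        · exact hmemhh x hx
  | some i =>
    have hi : i < b.1.length := h4 _ _ hg
    have hdmem : b.1.getD i PySem.Dict.empty ∈ b.1 := by
      rw [List.getD_eq_getElem _ _ hi]
      exact List.getElem_mem _
    obtain ⟨hnd, hdom⟩ := h5 _ hdmem
    refine ⟨?_, h2, by simp [h3], fun k j hj => by simpa using h4 k j hj, ?_⟩
    · rw [pvWrites_eq pos header.length inj hh hmemhh _ _ r hr a.1 i
        (by rw [h1]; simpa using hi) (by rw [h2, hg]; rfl)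
        (b.1.getD i PySem.Dict.empty) hnd hdom
        (by rw [h1, List.getD_eq_getElem _ _ (by simpa using hi),
                List.getD_eq_getElem _ _ hi, List.getElem_map])]
      rw [h1, List.map_set]
    · intro d hd
      rcases List.mem_or_eq_of_mem_set hd with hd | hd
      · exact h5 d hd
      · subst hd
        refine ⟨pvRowUpd_nodup _ _ _ hnd, ?_⟩
        intro x hx
        rcases pvRowUpd_keys _ _ _ _ hx with hx | hx
        · exact hdom x hx
        · exact hmemhh x hx

theorem dloop1 (header hh : List String) (pos : PySem.Dict String Nat)
    (inj : ∀ k1 k2 i, pos.get? k1 = some i → pos.get? k2 = some i → k1 = k2)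
    (hmemhh : ∀ x ∈ hh, ∃ i, pos.get? x = some i) :
    ∀ (data : List (List String)), (∀ r ∈ data, r.length ≤ hh.length) →
    ∀ a b, DInv pos header.length a b →
    DInv pos header.length (data.foldl (pvDStep1 pos header hh) a)
      (data.foldl (pvBStep1 hh) b) := by
  intro data
  induction data with
  | nil => intro _ a b hI; exact hI
  | cons r t ih =>
    intro hlen a b hI
    simp only [List.foldl_cons]
    exact ih (fun q hq => hlen q (by simp [hq])) _ _
      (dstep1 header hh pos inj hmemhh a b hI r (hlen r (by simp)))

theorem dloop2 (header hh : List String) (pos : PySem.Dict String Nat)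
    (inj : ∀ k1 k2 i, pos.get? k1 = some i → pos.get? k2 = some i → k1 = k2)
    (hmemhh : ∀ x ∈ hh, ∃ i, pos.get? x = some i) :
    ∀ (data : List (List String)), (∀ r ∈ data, r.length ≤ hh.length) →
    ∀ a b, DInv pos header.length a b →
    DInv pos header.length (data.foldl (pvDStep2 pos header hh) a)
      (data.foldl (pvBStep2 hh) b) := by
  intro data
  induction data with
  | nil => intro _ a b hI; exact hI
  | cons r t ih =>
    intro hlen a b hI
    simp only [List.foldl_cons]
    exact ih (fun q hq => hlen q (by simp [hq])) _ _
      (dstep2 header hh pos inj hmemhh a b hI r (hlen r (by simp)))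

-- ===== VERDICT (by name: the statement is the Claim_ definition above) =====
theorem merge_file_spec : Claim_equal_merge_file := by
  intro data1 data2 h1 h2 _ hPre
  obtain ⟨hd1, hd2⟩ := hPre
  unfold Spec_merge_file merge_file merge_file_alt
  have hbase : HInv ([], PySem.Dict.empty, 0) := ⟨rfl, rfl⟩
  obtain ⟨hI1, he1⟩ := loop1 h1 _ hbase
  obtain ⟨hI2, he2, hsub2, hall2⟩ :=
    loop2 h2 (h1.foldl pvHStep1 ([], PySem.Dict.empty, 0)) hI1
  have hhead : (h2.foldl pvHStep2 (h1.foldl pvHStep1 ([], PySem.Dict.empty, 0))).1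
      = h2.foldl (fun acc h => if h ∈ acc then acc else acc ++ [h]) h1 := by
    rw [he2, he1]; simp
  have hsubh1 : ∀ x ∈ h1,
      x ∈ (h2.foldl pvHStep2 (h1.foldl pvHStep1 ([], PySem.Dict.empty, 0))).1 := by
    intro x hx; exact hsub2 x (by rw [he1]; simp [hx])
  have hinj : ∀ k1 k2 i,
      (h2.foldl pvHStep2 (h1.foldl pvHStep1 ([], PySem.Dict.empty, 0))).2.1.get? k1 = some i →
      (h2.foldl pvHStep2 (h1.foldl pvHStep1 ([], PySem.Dict.empty, 0))).2.1.get? k2 = some i →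
      k1 = k2 := by
    rw [hI2.1]
    exact pvPosN_inj _
  have hmem1 : ∀ x ∈ h1, ∃ i,
      (h2.foldl pvHStep2 (h1.foldl pvHStep1 ([], PySem.Dict.empty, 0))).2.1.get? x
        = some i := by
    rw [hI2.1]
    exact fun x hx => pvPosN_mem _ x (hsubh1 x hx)
  have hmem2 : ∀ x ∈ h2, ∃ i,
      (h2.foldl pvHStep2 (h1.foldl pvHStep1 ([], PySem.Dict.empty, 0))).2.1.get? x
        = some i := by
    rw [hI2.1]
    exact fun x hx => pvPosN_mem _ x (hall2 x hx)
  have hI0 : DInv (h2.foldl pvHStep2 (h1.foldl pvHStep1 ([], PySem.Dict.empty, 0))).2.1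
      (h2.foldl pvHStep2 (h1.foldl pvHStep1 ([], PySem.Dict.empty, 0))).1.length
      ([], PySem.Dict.empty, 0) ([], PySem.Dict.empty) :=
    ⟨rfl, rfl, rfl, fun k i h => by simp [PySem.Dict.get?_empty] at h, by simp⟩
  have hA := dloop1 _ h1 _ hinj hmem1 data1 (fun r hr => (hd1 r hr).2) _ _ hI0
  have hB := dloop2 _ h2 _ hinj hmem2 data2 (fun r hr => (hd2 r hr).2) _ _ hA
  refine Prod.ext hhead ?_
  simp only
  rw [hB.1, hI2.1, hhead]
  apply List.map_congr_left
  intro d _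
  exact (pvMat_eq_matRow _ d).symm
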